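-- pv_equiv track=rewrite | github.com/swhur1214/cfr | src/counterfactual_regret_minimizer.py | build_parent_sequences
-- ===== SOURCE A (Python) =====
-- def build_parent_sequences(J, K, A, S, rho):
--     J = list(J)
--     K = list(K)
--     J_set = set(J)
--     K_set = set(K)
--     predecessors = {node: [] for node in J + K}
--
--     for j in J:
--         for action in A[j]:
--             child = rho[(j, action)]
--             if child in predecessors:
--                 predecessors[child].append((j, action))
--
--     for k in K:
--         for signal in S[k]:
--             child = rho[(k, signal)]
--             if child in predecessors:
--                 predecessors[child].append((k, signal))
--
--     sequence_by_node = {}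
--     visiting = set()
--
--     def resolve(node):
--         if node in sequence_by_node:
--             return sequence_by_node[node]
--         if node in visiting:
--             raise ValueError("Cycle detected while constructing parent sequences.")
--         visiting.add(node)
--
--         candidates = set()
--         for parent, label in predecessors[node]:
--             if parent in J_set:
--                 candidates.add((parent, label))
--             elif parent in K_set:
--                 candidates.add(resolve(parent))
--
--         if not candidates:
--             sequence = None
--         elif len(candidates) == 1:
--             sequence = next(iter(candidates))
--         else:
--             raise ValueError(
--                 f"Node {node!r} has multiple parent sequences: {candidates!r}"
--             )
--
--         visiting.remove(node)
--         sequence_by_node[node] = sequence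
--         return sequence
--
--     return {j: resolve(j) for j in J}
-- ===== SOURCE B (Python) =====
-- def build_parent_sequences(J, K, A, S, rho):
--     J = list(J)
--     K = list(K)
--     J_set = set(J)
--     K_set = set(K)
--     nodes = J + K
--     predecessors = {node: [] for node in nodes}
--
--     for j in J:
--         for action in A[j]:
--             child = rho[(j, action)]
--             if child in predecessors:
--                 predecessors[child].append((j, action))
--
--     for k in K:
--         for sig in S[k]:
--             child = rho[(k, sig)]
--             if child in predecessors:
--                 predecessors[child].append((k, sig))
--
--     # Round-based dataflow fixpoint: no recursion, no memo cache, no visiting set.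
--     # Each sweep resolves every node whose chance-parents are already resolved and
--     # whose candidate set is unambiguous; len(K)+1 sweeps suffice for every node
--     # the original resolves.  Ambiguous or cyclic nodes simply stay unresolved and
--     # are reported at the end if a decision node depends on one.
--     sequence_by_node = {}
--     for _ in range(len(K) + 1):
--         for n in nodes:
--             if n in sequence_by_node:
--                 continue
--             candidates = set()
--             ready = True
--             for parent, label in predecessors[n]:
--                 if parent in J_set:
--                     candidates.add((parent, label))
--                 elif parent in K_set:
--                     if parent in sequence_by_node:
--                         candidates.add(sequence_by_node[parent])
--                     else:
--                         ready = False
--                         break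
--             if not ready or len(candidates) > 1:
--                 continue
--             sequence_by_node[n] = next(iter(candidates)) if candidates else None
--
--     result = {}
--     for j in J:
--         if j not in sequence_by_node:
--             raise ValueError(
--                 "Cycle detected or ambiguous parent sequences while constructing parent sequences."
--             )
--         result[j] = sequence_by_node[j]
--     return result
-- ===== Notes on version B (the rewrite author's own statement) =====
-- stated objective: alternative
-- what changed: Replaces the memoized recursive resolve (DFS with a visiting-set for cycle detection) by a round-based dataflow fixpoint: len(K)+1 plain sweeps over all nodes, each sweep resolving every node whose chance-parents are already resolved and whose candidate set is unambiguous; no recursion, no memo cache, no visiting set, and unresolvable nodes are reported after the sweeps.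
import Mathlib
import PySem

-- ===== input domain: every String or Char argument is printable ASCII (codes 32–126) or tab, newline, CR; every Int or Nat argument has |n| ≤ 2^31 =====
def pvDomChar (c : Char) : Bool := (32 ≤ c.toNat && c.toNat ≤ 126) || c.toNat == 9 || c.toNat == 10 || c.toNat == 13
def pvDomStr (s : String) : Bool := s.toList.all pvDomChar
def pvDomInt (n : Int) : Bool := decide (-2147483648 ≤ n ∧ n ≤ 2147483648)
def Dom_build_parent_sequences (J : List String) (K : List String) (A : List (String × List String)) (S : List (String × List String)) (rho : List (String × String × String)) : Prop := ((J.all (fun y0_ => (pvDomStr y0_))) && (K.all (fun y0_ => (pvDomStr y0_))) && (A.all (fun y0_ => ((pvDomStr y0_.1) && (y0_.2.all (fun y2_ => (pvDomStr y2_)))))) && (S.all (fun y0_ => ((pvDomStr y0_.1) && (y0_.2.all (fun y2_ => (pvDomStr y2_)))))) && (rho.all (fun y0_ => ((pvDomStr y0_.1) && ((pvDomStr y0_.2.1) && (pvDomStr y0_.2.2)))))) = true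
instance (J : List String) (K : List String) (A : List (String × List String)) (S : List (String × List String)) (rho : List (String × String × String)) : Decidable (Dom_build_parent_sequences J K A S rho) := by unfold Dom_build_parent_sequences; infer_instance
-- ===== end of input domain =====

-- B replaces the memoized recursive `resolve` (with its visiting-set cycle detection) by a
-- round-based dataflow fixpoint: len(K)+1 sweeps over all nodes, each resolving the nodes whose
-- chance-parents are already resolved; no recursion, no memo cache, no visiting set.
-- Both Pythons' identical forward pass (building `predecessors`) is the shared helper pvBuildPreds.

-- shared helper: rho is a Python dict keyed by the PAIR (node, label); as an association list of
-- flattened triples, lookup is first match on both components (exact: a Python dict has unique keys).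
def pvRhoGet (rho : List (String × String × String)) (a b : String) : Option String :=
  (rho.find? (fun t => t.1 == a && t.2.1 == b)).map (fun t => t.2.2)

-- shared helper: the forward pass both Pythons contain verbatim ({node: [] for node in J+K},
-- then append (j,action) / (k,signal) under rho[(…)] when the child is a known node).
-- Python exceptions (KeyError on A[j] / S[k] / rho[(…)]) are modelled as `none`.
def pvBuildPreds (J : List String) (K : List String) (A : List (String × List String)) (S : List (String × List String)) (rho : List (String × String × String)) : Option (PySem.Dict String (List (String × String))) :=
  let preds0 : PySem.Dict String (List (String × String)) :=
    (J ++ K).foldl (fun d n => d.insert n []) (PySem.Dict.mk [])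
  let predsJ : Option (PySem.Dict String (List (String × String))) :=
    J.foldl (fun acc j =>
      acc.bind fun d =>
        match (PySem.Dict.mk A).get? j with
        | none => none
        | some acts =>
          acts.foldl (fun acc2 a =>
            acc2.bind fun d2 =>
              match pvRhoGet rho j a with
              | none => none
              | some child =>
                if d2.contains child then some (d2.modify child [] (fun l => l ++ [(j, a)])) else some d2)
            (some d))
      (some preds0)
  K.foldl (fun acc k =>
    acc.bind fun d =>
      match (PySem.Dict.mk S).get? k with
      | none => none
      | some sigs =>
        sigs.foldl (fun acc2 s =>
          acc2.bind fun d2 =>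
            match pvRhoGet rho k s with
            | none => none
            | some child =>
              if d2.contains child then some (d2.modify child [] (fun l => l ++ [(k, s)])) else some d2)
          (some d))
    predsJ

-- ===== PORT A =====
-- resolve: memoized recursion with a `visiting` set; Python exceptions (ValueError for
-- cycle / multiple parent sequences) are modelled as `none`; the Nat fuel only makes the same
-- recursion total (it is never exhausted when the Python returns: depth ≤ |J|+|K|+1).
mutual
def pvResolveA (Jset Kset : PySem.Set String) (preds : PySem.Dict String (List (String × String))) :
    Nat → String → PySem.Dict String (Option (String × String)) → PySem.Set String →
      Option (PySem.Dict String (Option (String × String)) × PySem.Set String × Option (String × String))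
  | 0, _, _, _ => none
  | fuel+1, node, memo, visiting =>
    match memo.get? node with
    | some s => some (memo, visiting, s)
    | none =>
      if PySem.Set.contains visiting node then none
      else
        match preds.get? node with
        | none => none
        | some edges =>
          match pvCandLoop Jset Kset preds fuel edges PySem.Set.empty memo (PySem.Set.add visiting node) with
          | none => none
          | some (cands, memo2, vis2) =>
            match cands with
            | [] =>
              match PySem.Set.remove? vis2 node with
              | none => none
              | some vis3 => some (memo2.insert node none, vis3, none)
            | [c] =>
              match PySem.Set.remove? vis2 node with
              | none => none
              | some vis3 => some (memo2.insert node c, vis3, c)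
            | _ => none
  termination_by fuel _ _ _ => (fuel, 0)

def pvCandLoop (Jset Kset : PySem.Set String) (preds : PySem.Dict String (List (String × String))) :
    Nat → List (String × String) → PySem.Set (Option (String × String)) →
      PySem.Dict String (Option (String × String)) → PySem.Set String →
      Option (PySem.Set (Option (String × String)) × PySem.Dict String (Option (String × String)) × PySem.Set String)
  | _, [], cands, memo, visiting => some (cands, memo, visiting)
  | fuel, e :: rest, cands, memo, visiting =>
    if PySem.Set.contains Jset e.1 then
      pvCandLoop Jset Kset preds fuel rest (PySem.Set.add cands (some e)) memo visiting
    else if PySem.Set.contains Kset e.1 then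
      match pvResolveA Jset Kset preds fuel e.1 memo visiting with
      | none => none
      | some (memo2, vis2, s) => pvCandLoop Jset Kset preds fuel rest (PySem.Set.add cands s) memo2 vis2
    else
      pvCandLoop Jset Kset preds fuel rest cands memo visiting
  termination_by fuel edges _ _ _ => (fuel, edges.length + 1)
end

def build_parent_sequences (J : List String) (K : List String) (A : List (String × List String)) (S : List (String × List String)) (rho : List (String × String × String)) : List (String × Option (String × String)) :=
  let Jset := PySem.Set.ofList J
  let Kset := PySem.Set.ofList K
  match pvBuildPreds J K A S rho with
  | none => []
  | some preds =>
    let res :=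
      J.foldl (fun acc j =>
        acc.bind fun st =>
          match pvResolveA Jset Kset preds (J.length + K.length + 1) j st.1 st.2.1 with
          | none => none
          | some (memo, vis, s) => some (memo, vis, st.2.2.insert j s))
        (some ((PySem.Dict.mk [] : PySem.Dict String (Option (String × String))),
               (PySem.Set.empty : PySem.Set String),
               (PySem.Dict.mk [] : PySem.Dict String (Option (String × String)))))
    match res with
    | none => []
    | some (_, _, out) => out.items

-- ===== PORT B =====
-- the inner candidate loop of one sweep: J-parents contribute (parent,label), resolved
-- K-parents contribute their sequence; `none` = `ready = False` (an unresolved K-parent, break)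
def pvCandB (Jset Kset : PySem.Set String) (seq : PySem.Dict String (Option (String × String))) :
    List (String × String) → PySem.Set (Option (String × String)) → Option (PySem.Set (Option (String × String)))
  | [], cands => some cands
  | e :: rest, cands =>
    if PySem.Set.contains Jset e.1 then
      pvCandB Jset Kset seq rest (PySem.Set.add cands (some e))
    else if PySem.Set.contains Kset e.1 then
      match seq.get? e.1 with
      | some s => pvCandB Jset Kset seq rest (PySem.Set.add cands s)
      | none => none
    else
      pvCandB Jset Kset seq rest cands

-- one node of one sweep: skip if resolved, skip if not ready or ambiguous, else record the
-- sequence (None for no candidate, the single candidate otherwise).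
-- predecessors[n] is a dict lookup that never fails (every n ∈ J++K is a key): getD is exact.
def pvStepB (Jset Kset : PySem.Set String) (preds : PySem.Dict String (List (String × String)))
    (sq : PySem.Dict String (Option (String × String))) (n : String) : PySem.Dict String (Option (String × String)) :=
  if (sq.get? n).isSome then sq
  else
    match pvCandB Jset Kset sq (preds.getD n []) PySem.Set.empty with
    | none => sq
    | some [] => sq.insert n none
    | some [c] => sq.insert n c
    | some _ => sq

def pvRoundB (Jset Kset : PySem.Set String) (preds : PySem.Dict String (List (String × String)))
    (nodes : List String) (sq : PySem.Dict String (Option (String × String))) : PySem.Dict String (Option (String × String)) :=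
  nodes.foldl (pvStepB Jset Kset preds) sq

def build_parent_sequences_alt (J : List String) (K : List String) (A : List (String × List String)) (S : List (String × List String)) (rho : List (String × String × String)) : List (String × Option (String × String)) :=
  let Jset := PySem.Set.ofList J
  let Kset := PySem.Set.ofList K
  match pvBuildPreds J K A S rho with
  | none => []
  | some preds =>
    let seqF := (List.range (K.length + 1)).foldl (fun sq _ => pvRoundB Jset Kset preds (J ++ K) sq) (PySem.Dict.mk [])
    -- final loop: raise (→ none) if some decision node stayed unresolved
    match J.foldl (fun acc j =>
        acc.bind fun res =>
          match seqF.get? j with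
          | none => none
          | some s => some (res.insert j s))
        (some (PySem.Dict.mk [] : PySem.Dict String (Option (String × String)))) with
    | none => []
    | some res => res.items

-- ===== PRECONDITION & SPEC =====
-- the edge stream (child by child) that the forward pass reads off the input, in loop order
def pvRawStream (J : List String) (K : List String) (A : List (String × List String)) (S : List (String × List String)) (rho : List (String × String × String)) : List ((String × String) × String) :=
  (J.flatMap fun j => ((PySem.Dict.mk A).getD j []).filterMap fun a =>
      (pvRhoGet rho j a).map fun c => ((j, a), c)) ++
  (K.flatMap fun k => ((PySem.Dict.mk S).getD k []).filterMap fun s =>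
      (pvRhoGet rho k s).map fun c => ((k, s), c))

-- the predecessor edges of a node, in append order (= predecessors[n] after the forward pass)
def pvRawEdges (J : List String) (K : List String) (A : List (String × List String)) (S : List (String × List String)) (rho : List (String × String × String)) (n : String) : List (String × String) :=
  ((pvRawStream J K A S rho).filter (fun p => p.2 == n)).map (·.1)

-- reference resolution on the input graph: pure bounded recursion computing the candidate set of
-- a node (J-parents contribute the edge, K-parents their recursively resolved sequence);
-- `none` = unresolvable within the fuel (cycle), or more than one distinct candidate (ambiguous)
def pvCandsF (Jl Kl : List String) (rec : String → Option (Option (String × String))) :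
    List (String × String) → PySem.Set (Option (String × String)) →
      Option (PySem.Set (Option (String × String)))
  | [], cands => some cands
  | e :: rest, cands =>
    if Jl.contains e.1 then pvCandsF Jl Kl rec rest (PySem.Set.add cands (some e))
    else if Kl.contains e.1 then
      match rec e.1 with
      | none => none
      | some s => pvCandsF Jl Kl rec rest (PySem.Set.add cands s)
    else pvCandsF Jl Kl rec rest cands

def pvSeqR (Jl Kl : List String) (E : String → List (String × String)) :
    Nat → String → Option (Option (String × String))
  | 0, _ => none
  | f+1, n =>
    match pvCandsF Jl Kl (pvSeqR Jl Kl E f) (E n) PySem.Set.empty with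
    | none => none
    | some [] => some none
    | some [c] => some c
    | some _ => none

-- Pre_ excludes exactly the inputs on which A raises: a KeyError from a missing A/S/rho key, or a
-- ValueError from resolve (a cycle through chance nodes, or a node with more than one distinct
-- parent-sequence candidate); fuel |K|+1 covers every chain A's visiting-set admits.
def Pre_build_parent_sequences (J : List String) (K : List String) (A : List (String × List String)) (S : List (String × List String)) (rho : List (String × String × String)) : Prop :=
  (∀ j ∈ J, ((PySem.Dict.mk A).get? j).isSome = true) ∧
  (∀ j ∈ J, ∀ a ∈ (PySem.Dict.mk A).getD j [], (pvRhoGet rho j a).isSome = true) ∧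
  (∀ k ∈ K, ((PySem.Dict.mk S).get? k).isSome = true) ∧
  (∀ k ∈ K, ∀ s ∈ (PySem.Dict.mk S).getD k [], (pvRhoGet rho k s).isSome = true) ∧
  (∀ j ∈ J, (pvSeqR J K (pvRawEdges J K A S rho) (K.length + 1) j).isSome = true)

instance (J : List String) (K : List String) (A : List (String × List String)) (S : List (String × List String)) (rho : List (String × String × String)) : Decidable (Pre_build_parent_sequences J K A S rho) := by unfold Pre_build_parent_sequences; infer_instance

def pvWitness_build_parent_sequences : List String × List String × (List (String × List String)) × (List (String × List String)) × (List (String × String × String)) :=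
  (["j"], ["k"], [("j", ["a"])], [("k", ["s"])], [("j", "a", "k"), ("k", "s", "j")])

def Spec_build_parent_sequences (J : List String) (K : List String) (A : List (String × List String)) (S : List (String × List String)) (rho : List (String × String × String)) (out : List (String × Option (String × String))) : Prop := out = build_parent_sequences_alt J K A S rho
instance (J : List String) (K : List String) (A : List (String × List String)) (S : List (String × List String)) (rho : List (String × String × String)) (out : List (String × Option (String × String))) : Decidable (Spec_build_parent_sequences J K A S rho out) := by unfold Spec_build_parent_sequences; infer_instance

-- ===== CLAIM (what is proved, stated in full; the proofs are below) =====
def Claim_equal_build_parent_sequences : Prop := ∀ (J : List String) (K : List String) (A : List (String × List String)) (S : List (String × List String)) (rho : List (String × String × String)), Dom_build_parent_sequences J K A S rho → Pre_build_parent_sequences J K A S rho → Spec_build_parent_sequences J K A S rho (build_parent_sequences J K A S rho)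

-- ===== LEMMAS AND PROOFS =====

theorem pv_witness_ok :
    Dom_build_parent_sequences pvWitness_build_parent_sequences.1 pvWitness_build_parent_sequences.2.1 pvWitness_build_parent_sequences.2.2.1 pvWitness_build_parent_sequences.2.2.2.1 pvWitness_build_parent_sequences.2.2.2.2 ∧
    Pre_build_parent_sequences pvWitness_build_parent_sequences.1 pvWitness_build_parent_sequences.2.1 pvWitness_build_parent_sequences.2.2.1 pvWitness_build_parent_sequences.2.2.2.1 pvWitness_build_parent_sequences.2.2.2.2 := by
  constructor <;> decide

-- ---- reference-function facts ----

-- pvCandsF is monotone in the resolver it is given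
theorem pvCandsF_mono_rec (Jl Kl : List String) (rec rec' : String → Option (Option (String × String)))
    (h : ∀ n s, rec n = some s → rec' n = some s) :
    ∀ raw cands out, pvCandsF Jl Kl rec raw cands = some out → pvCandsF Jl Kl rec' raw cands = some out := by
  intro raw
  induction raw with
  | nil => intro cands out hc; simpa [pvCandsF] using hc
  | cons e rest ih =>
    intro cands out hc
    by_cases hJ : Jl.contains e.1 = true
    · simp only [pvCandsF, hJ, if_true] at hc ⊢
      exact ih _ _ hc
    · by_cases hK : Kl.contains e.1 = true
      · simp only [pvCandsF, hJ, hK, if_true, if_false, Bool.false_eq_true] at hc ⊢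
        rcases hr : rec e.1 with _ | s
        · rw [hr] at hc; cases hc
        · rw [hr] at hc
          rw [h e.1 s hr]
          exact ih _ _ hc
      · simp only [pvCandsF, hJ, hK, if_false, Bool.false_eq_true] at hc ⊢
        exact ih _ _ hc

theorem pvSeqR_stable (Jl Kl : List String) (E : String → List (String × String)) :
    ∀ f f' n s, f ≤ f' → pvSeqR Jl Kl E f n = some s → pvSeqR Jl Kl E f' n = some s := by
  intro f
  induction f with
  | zero => intro f' n s _ h; simp [pvSeqR] at h
  | succ f ih =>
    intro f' n s hle h
    obtain ⟨f'', rfl⟩ : ∃ g, f' = g + 1 := ⟨f' - 1, by omega⟩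
    have hmono := pvCandsF_mono_rec Jl Kl (pvSeqR Jl Kl E f) (pvSeqR Jl Kl E f'')
      (fun m t => ih f'' m t (by omega))
    simp only [pvSeqR] at h ⊢
    rcases hc : pvCandsF Jl Kl (pvSeqR Jl Kl E f) (E n) PySem.Set.empty with _ | out
    · rw [hc] at h; cases h
    · rw [hc] at h
      rw [hmono _ _ _ hc]
      exact h

theorem pvSeqR_isSome_mono (Jl Kl : List String) (E : String → List (String × String))
    {f f' : Nat} {n : String} (hle : f ≤ f') (h : (pvSeqR Jl Kl E f n).isSome = true) :
    (pvSeqR Jl Kl E f' n).isSome = true := by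
  obtain ⟨s, hs⟩ := Option.isSome_iff_exists.1 h
  rw [pvSeqR_stable Jl Kl E f f' n s hle hs]; rfl

theorem pvSeqR_min (Jl Kl : List String) (E : String → List (String × String)) :
    ∀ f n, (pvSeqR Jl Kl E f n).isSome = true →
      ∃ c, c < f ∧ (pvSeqR Jl Kl E (c+1) n).isSome = true ∧ (pvSeqR Jl Kl E c n).isSome = false := by
  intro f
  induction f with
  | zero => intro n h; simp [pvSeqR] at h
  | succ f ih =>
    intro n h
    by_cases h0 : (pvSeqR Jl Kl E f n).isSome = true
    · obtain ⟨c, h1, h2, h3⟩ := ih n h0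
      exact ⟨c, by omega, h2, h3⟩
    · exact ⟨f, by omega, h, by simpa using h0⟩

-- ---- forward-pass facts (shared by both ports through pvBuildPreds) ----

theorem pv_preds0_get? (l : List String) :
    ∀ (d : PySem.Dict String (List (String × String))) (x : String),
      (l.foldl (fun d n => d.insert n []) d).get? x = if x ∈ l then some [] else d.get? x := by
  induction l with
  | nil => intro d x; simp
  | cons n l ih =>
    intro d x
    simp only [List.foldl_cons, ih, PySem.Dict.get?_insert]
    by_cases h1 : x ∈ l <;> by_cases h2 : x = n <;> simp [h1, h2]

-- generic reduction of one forward-pass loop (Option monad, all lookups succeed) to a plain fold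
theorem pv_optfold {δ : Type} (T : List (String × List String)) (rho : List (String × String × String))
    (g : δ → ((String × String) × String) → δ) (h : δ → ((String × String) × String) → Option δ)
    (hg : ∀ d p, h d p = some (g d p)) :
    ∀ (L : List String),
      (∀ x ∈ L, ((PySem.Dict.mk T).get? x).isSome = true) →
      (∀ x ∈ L, ∀ a ∈ (PySem.Dict.mk T).getD x [], (pvRhoGet rho x a).isSome = true) →
      ∀ d0 : δ,
      L.foldl (fun acc x =>
        acc.bind fun d =>
          match (PySem.Dict.mk T).get? x with
          | none => none
          | some acts =>
            acts.foldl (fun acc2 a =>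
              acc2.bind fun d2 =>
                match pvRhoGet rho x a with
                | none => none
                | some child => h d2 ((x, a), child)) (some d)) (some d0)
      = some ((L.flatMap fun x => ((PySem.Dict.mk T).getD x []).filterMap fun a =>
          (pvRhoGet rho x a).map fun c => ((x, a), c)).foldl g d0) := by
  intro L
  induction L with
  | nil => intro _ _ d0; simp
  | cons x L ih =>
    intro hA hR d0
    have hx : ((PySem.Dict.mk T).get? x).isSome = true := hA x (List.mem_cons_self)
    obtain ⟨acts, hacts⟩ := Option.isSome_iff_exists.1 hx
    have hgetD : (PySem.Dict.mk T).getD x [] = acts := by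
      simp [PySem.Dict.getD, hacts]
    have hinner : ∀ (acts' : List String), (∀ a ∈ acts', (pvRhoGet rho x a).isSome = true) →
        ∀ d : δ,
        acts'.foldl (fun acc2 a =>
          acc2.bind fun d2 =>
            match pvRhoGet rho x a with
            | none => none
            | some child => h d2 ((x, a), child)) (some d)
        = some ((acts'.filterMap fun a => (pvRhoGet rho x a).map fun c => ((x, a), c)).foldl g d) := by
      intro acts'
      induction acts' with
      | nil => intro _ d; simp
      | cons a acts' ih2 =>
        intro hs d
        have ha : (pvRhoGet rho x a).isSome = true := hs a (List.mem_cons_self)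
        obtain ⟨c, hc⟩ := Option.isSome_iff_exists.1 ha
        simp only [List.foldl_cons, Option.bind_some, hc, List.filterMap_cons, Option.map_some]
        rw [hg, ih2 (fun a' ha' => hs a' (List.mem_cons_of_mem _ ha'))]
    simp only [List.foldl_cons, Option.bind_some, hacts, List.flatMap_cons, List.foldl_append]
    rw [hinner acts (by rw [← hgetD]; exact hR x List.mem_cons_self) d0,
        ih (fun y hy => hA y (List.mem_cons_of_mem _ hy)) (fun y hy => hR y (List.mem_cons_of_mem _ hy))]
    rw [hgetD]

-- the forward fold: key set unchanged, per-key list grows by the matching stream edges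
theorem pvA_fold_contains (stream : List ((String × String) × String)) :
    ∀ (d : PySem.Dict String (List (String × String))) (x : String),
      (stream.foldl (fun d2 p => if d2.contains p.2 then d2.modify p.2 [] (fun l => l ++ [p.1]) else d2) d).contains x = d.contains x := by
  induction stream with
  | nil => intro d x; simp
  | cons p st ih =>
    intro d x
    simp only [List.foldl_cons]
    by_cases h : d.contains p.2 = true
    · simp only [h, if_true, ih]
      rw [PySem.Dict.contains_modify]
      by_cases hx : x = p.2
      · subst hx; simp [h]
      · simp [hx]
    · simp [h, ih]

theorem pvA_fold_getD (stream : List ((String × String) × String)) :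
    ∀ (d : PySem.Dict String (List (String × String))) (n : String), d.contains n = true →
      (stream.foldl (fun d2 p => if d2.contains p.2 then d2.modify p.2 [] (fun l => l ++ [p.1]) else d2) d).getD n []
      = d.getD n [] ++ (stream.filter (fun p => p.2 == n)).map (·.1) := by
  induction stream with
  | nil => intro d n _; simp
  | cons p st ih =>
    intro d n hn
    simp only [List.foldl_cons, List.filter_cons]
    by_cases hpn : p.2 == n
    · simp only [hpn, if_true]
      have : d.contains p.2 = true := by simp at hpn; rwa [hpn]
      simp only [this, if_true]
      rw [ih _ n (by rw [PySem.Dict.contains_modify]; simp [hn])]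
      have hd : (d.modify p.2 [] (fun l => l ++ [p.1])).getD n [] = d.getD n [] ++ [p.1] := by
        simp at hpn; subst hpn
        rw [PySem.Dict.getD_modify_self]
      rw [hd]; simp
    · have hne : n ≠ p.2 := by simp at hpn; exact fun h => hpn (h ▸ rfl)
      by_cases hc : d.contains p.2 = true
      · simp only [hc, if_true]
        rw [ih _ n (by rw [PySem.Dict.contains_modify]; simp [hn])]
        rw [PySem.Dict.getD_modify_of_ne _ _ _ hne]
        simp [hpn]
      · rw [if_neg hc]
        rw [ih d n hn]
        simp [hpn]

theorem pvRawStream_def (J : List String) (K : List String) (A : List (String × List String)) (S : List (String × List String)) (rho : List (String × String × String)) :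
    pvRawStream J K A S rho =
      (J.flatMap fun j => ((PySem.Dict.mk A).getD j []).filterMap fun a =>
          (pvRhoGet rho j a).map fun c => ((j, a), c)) ++
      (K.flatMap fun k => ((PySem.Dict.mk S).getD k []).filterMap fun s =>
          (pvRhoGet rho k s).map fun c => ((k, s), c)) := rfl

theorem pv_preds_get (J : List String) (K : List String) (A : List (String × List String)) (S : List (String × List String)) (rho : List (String × String × String)) :
    ∀ m, m ∈ J ∨ m ∈ K →
      ((pvRawStream J K A S rho).foldl
        (fun d2 p => if d2.contains p.2 then d2.modify p.2 [] (fun l => l ++ [p.1]) else d2)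
        ((J ++ K).foldl (fun d n => d.insert n []) (PySem.Dict.mk []))).get? m
      = some (pvRawEdges J K A S rho m) := by
  intro m hmem
  have hget0 : ((J ++ K).foldl (fun d n => d.insert n []) (PySem.Dict.mk [] : PySem.Dict String (List (String × String)))).get? m = some [] := by
    rw [pv_preds0_get?]; simp [List.mem_append.2 hmem]
  have hc0 : ((J ++ K).foldl (fun d n => d.insert n []) (PySem.Dict.mk [] : PySem.Dict String (List (String × String)))).contains m = true := by
    rw [PySem.Dict.contains_eq_isSome_get?, hget0]; rfl
  have hcont := pvA_fold_contains (pvRawStream J K A S rho)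
    ((J ++ K).foldl (fun d n => d.insert n []) (PySem.Dict.mk [])) m
  have hgd := pvA_fold_getD (pvRawStream J K A S rho)
    ((J ++ K).foldl (fun d n => d.insert n []) (PySem.Dict.mk [])) m hc0
  have hgd0 : ((J ++ K).foldl (fun d n => d.insert n []) (PySem.Dict.mk [] : PySem.Dict String (List (String × String)))).getD m [] = [] := by
    rw [PySem.Dict.getD_eq_get?_getD, hget0]; rfl
  have hsome : (((pvRawStream J K A S rho).foldl
      (fun d2 p => if d2.contains p.2 then d2.modify p.2 [] (fun l => l ++ [p.1]) else d2)
      ((J ++ K).foldl (fun d n => d.insert n []) (PySem.Dict.mk []))).get? m).isSome = true := by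
    rw [← PySem.Dict.contains_eq_isSome_get?, hcont]; exact hc0
  obtain ⟨x, hx⟩ := Option.isSome_iff_exists.1 hsome
  have hxval : x = pvRawEdges J K A S rho m := by
    have h1 : ((pvRawStream J K A S rho).foldl
        (fun d2 p => if d2.contains p.2 then d2.modify p.2 [] (fun l => l ++ [p.1]) else d2)
        ((J ++ K).foldl (fun d n => d.insert n []) (PySem.Dict.mk []))).getD m [] = x := by
      rw [PySem.Dict.getD_eq_get?_getD, hx]; rfl
    rw [h1, hgd0] at hgd
    rw [hgd, pvRawEdges]
    simp
  rw [hx, hxval]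

theorem pv_foldA_red (L : List String) (T : List (String × List String)) (rho : List (String × String × String))
    (hA : ∀ x ∈ L, ((PySem.Dict.mk T).get? x).isSome = true)
    (hR : ∀ x ∈ L, ∀ a ∈ (PySem.Dict.mk T).getD x [], (pvRhoGet rho x a).isSome = true)
    (d0 : PySem.Dict String (List (String × String))) :
    L.foldl (fun acc j =>
      acc.bind fun d =>
        match (PySem.Dict.mk T).get? j with
        | none => none
        | some acts =>
          acts.foldl (fun acc2 a =>
            acc2.bind fun d2 =>
              match pvRhoGet rho j a with
              | none => none
              | some child =>
                if d2.contains child then some (d2.modify child [] (fun l => l ++ [(j, a)])) else some d2)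
            (some d)) (some d0)
    = some ((L.flatMap fun x => ((PySem.Dict.mk T).getD x []).filterMap fun a =>
        (pvRhoGet rho x a).map fun c => ((x, a), c)).foldl
          (fun d2 p => if d2.contains p.2 then d2.modify p.2 [] (fun l => l ++ [p.1]) else d2) d0) :=
  pv_optfold T rho
    (fun d2 p => if d2.contains p.2 then d2.modify p.2 [] (fun l => l ++ [p.1]) else d2)
    (fun d2 p => if d2.contains p.2 then some (d2.modify p.2 [] (fun l => l ++ [p.1])) else some d2)
    (fun d p => by by_cases h : d.contains p.2 = true <;> simp [h]) L hA hR d0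

theorem pv_buildPreds (J : List String) (K : List String) (A : List (String × List String)) (S : List (String × List String)) (rho : List (String × String × String))
    (hA : ∀ j ∈ J, ((PySem.Dict.mk A).get? j).isSome = true)
    (hR : ∀ j ∈ J, ∀ a ∈ (PySem.Dict.mk A).getD j [], (pvRhoGet rho j a).isSome = true)
    (hS : ∀ k ∈ K, ((PySem.Dict.mk S).get? k).isSome = true)
    (hRS : ∀ k ∈ K, ∀ s ∈ (PySem.Dict.mk S).getD k [], (pvRhoGet rho k s).isSome = true) :
    ∃ preds, pvBuildPreds J K A S rho = some preds ∧
      ∀ m, m ∈ J ∨ m ∈ K → preds.get? m = some (pvRawEdges J K A S rho m) := by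
  refine ⟨_, ?_, pv_preds_get J K A S rho⟩
  unfold pvBuildPreds
  dsimp only
  rw [pv_foldA_red J A rho hA hR, pv_foldA_red K S rho hS hRS,
      ← List.foldl_append, ← pvRawStream_def]

-- ---- Python-set helper facts ----

theorem pv_set_remove_add {α : Type} [BEq α] [LawfulBEq α] (v : PySem.Set α) (n : α)
    (h : PySem.Set.contains v n = false) : PySem.Set.remove? (PySem.Set.add v n) n = some v := by
  have hn : n ∉ v := by
    intro hm
    rw [(PySem.Set.contains_iff v n).2 hm] at h; exact Bool.true_eq_false.mp h
  rw [PySem.Set.add_of_not_mem hn, PySem.Set.remove?_of_mem (by simp)]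
  congr 1
  simp only [PySem.Set.discard, List.filter_append]
  rw [List.filter_eq_self.2, List.filter_cons]
  · simp
  · intro a ha
    simp only [Bool.not_eq_eq_eq_not, Bool.not_true, beq_eq_false_iff_ne, ne_eq]
    exact fun he => hn (he ▸ ha)

theorem pv_contains_ofList (J : List String) (x : String) :
    PySem.Set.contains (PySem.Set.ofList J) x = J.contains x := by
  by_cases h : x ∈ J
  · rw [(PySem.Set.contains_iff _ _).2 ((PySem.Set.mem_ofList _ _).2 h)]
    exact (List.contains_iff_mem.2 h).symm
  · have h1 : x ∉ PySem.Set.ofList J := fun hm => h ((PySem.Set.mem_ofList _ _).1 hm)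
    have h2 : PySem.Set.contains (PySem.Set.ofList J) x ≠ true := fun hc => h1 ((PySem.Set.contains_iff _ _).1 hc)
    have h3 : J.contains x ≠ true := fun hc => h (List.contains_iff_mem.1 hc)
    rw [Bool.eq_false_iff.2 h2, Bool.eq_false_iff.2 h3]

-- ---- the memo / sequence-table invariants (proof-only definitions) ----

def pvInvA (J K : List String) (A : List (String × List String)) (S : List (String × List String)) (rho : List (String × String × String)) (memo : PySem.Dict String (Option (String × String))) : Prop :=
  ∀ m s, memo.get? m = some s → pvSeqR J K (pvRawEdges J K A S rho) (K.length + 1) m = some s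

def pvInvB (J K : List String) (A : List (String × List String)) (S : List (String × List String)) (rho : List (String × String × String)) (sq : PySem.Dict String (Option (String × String))) : Prop :=
  ∀ m s, sq.get? m = some s → ∃ f, pvSeqR J K (pvRawEdges J K A S rho) f m = some s

-- ---- A's resolve computes the reference value and leaves `visiting` unchanged ----

theorem pv_resolveA_correct (J : List String) (K : List String) (A : List (String × List String)) (S : List (String × List String)) (rho : List (String × String × String))
    (preds : PySem.Dict String (List (String × String)))
    (hpreds : ∀ m, m ∈ J ∨ m ∈ K → preds.get? m = some (pvRawEdges J K A S rho m)) :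
    ∀ fuel c node memo visiting,
      (pvSeqR J K (pvRawEdges J K A S rho) (c+1) node).isSome = true →
      (pvSeqR J K (pvRawEdges J K A S rho) c node).isSome = false →
      c < fuel →
      c + 1 ≤ K.length + 1 →
      (node ∈ J ∨ node ∈ K) →
      pvInvA J K A S rho memo →
      (∀ m, PySem.Set.contains visiting m = true → (pvSeqR J K (pvRawEdges J K A S rho) (c+1) m).isSome = false) →
      ∃ memo' v,
        pvResolveA (PySem.Set.ofList J) (PySem.Set.ofList K) preds fuel node memo visiting = some (memo', visiting, v) ∧
        pvSeqR J K (pvRawEdges J K A S rho) (K.length+1) node = some v ∧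
        pvInvA J K A S rho memo' := by
  intro fuel
  induction fuel with
  | zero => intro c node memo visiting _ _ hcf _ _ _ _; omega
  | succ fuel ih =>
    intro c node memo visiting hOK hNOK hcf hcN hmem hinv hvis
    rcases hm : memo.get? node with _ | s
    · -- not memoized
      have hvn : PySem.Set.contains visiting node = false := by
        cases hveq : PySem.Set.contains visiting node
        · rfl
        · exact absurd hOK (by simp [hvis node hveq])
      have hp := hpreds node hmem
      rcases hcr : pvCandsF J K (pvSeqR J K (pvRawEdges J K A S rho) c) (pvRawEdges J K A S rho node) PySem.Set.empty with _ | out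
      · exfalso
        rw [show pvSeqR J K (pvRawEdges J K A S rho) (c+1) node = none by
          simp only [pvSeqR, hcr]] at hOK
        simp at hOK
      -- the candidate loop of A follows the reference candidate computation
      have hcand : ∀ raw' cands memo1, pvInvA J K A S rho memo1 →
          ∀ out', pvCandsF J K (pvSeqR J K (pvRawEdges J K A S rho) c) raw' cands = some out' →
          ∃ memo2,
            pvCandLoop (PySem.Set.ofList J) (PySem.Set.ofList K) preds fuel raw' cands memo1 (PySem.Set.add visiting node)
              = some (out', memo2, PySem.Set.add visiting node) ∧ pvInvA J K A S rho memo2 := by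
        intro raw'
        induction raw' with
        | nil =>
          intro cands memo1 hinv1 out' hc
          simp only [pvCandsF] at hc
          cases hc
          exact ⟨memo1, by simp [pvCandLoop], hinv1⟩
        | cons e rest ihr =>
          intro cands memo1 hinv1 out' hc
          by_cases hJ : J.contains e.1 = true
          · have hJs : PySem.Set.contains (PySem.Set.ofList J) e.1 = true := by
              rw [pv_contains_ofList]; exact hJ
            simp only [pvCandsF, hJ, if_true] at hc
            obtain ⟨memo2, hrun, hinv2⟩ := ihr _ memo1 hinv1 out' hc
            exact ⟨memo2, by simp only [pvCandLoop, hJs, if_true]; exact hrun, hinv2⟩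
          · by_cases hK : K.contains e.1 = true
            · have hJsF : PySem.Set.contains (PySem.Set.ofList J) e.1 = false := by
                rw [pv_contains_ofList]; exact Bool.eq_false_iff.2 hJ
              have hKs : PySem.Set.contains (PySem.Set.ofList K) e.1 = true := by
                rw [pv_contains_ofList]; exact hK
              simp only [pvCandsF, hJ, hK, if_true, if_false, Bool.false_eq_true] at hc
              rcases hrec : pvSeqR J K (pvRawEdges J K A S rho) c e.1 with _ | s1
              · rw [hrec] at hc; cases hc
              · rw [hrec] at hc
                have hKOK : (pvSeqR J K (pvRawEdges J K A S rho) c e.1).isSome = true := by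
                  rw [hrec]; rfl
                obtain ⟨cp, hcp1, hcp2, hcp3⟩ := pvSeqR_min J K (pvRawEdges J K A S rho) c e.1 hKOK
                have hvisP : ∀ m, PySem.Set.contains (PySem.Set.add visiting node) m = true →
                    (pvSeqR J K (pvRawEdges J K A S rho) (cp+1) m).isSome = false := by
                  intro m hmv
                  have hmem3 : m ∈ PySem.Set.add visiting node := (PySem.Set.contains_iff _ _).1 hmv
                  rcases (PySem.Set.mem_add _ _ _).1 hmem3 with hmold | rfl
                  · have h1 := hvis m ((PySem.Set.contains_iff _ _).2 hmold)
                    cases hq : (pvSeqR J K (pvRawEdges J K A S rho) (cp+1) m).isSome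
                    · rfl
                    · exact absurd (pvSeqR_isSome_mono J K (pvRawEdges J K A S rho) (show cp+1 ≤ c+1 by omega) hq) (by simp [h1])
                  · cases hq : (pvSeqR J K (pvRawEdges J K A S rho) (cp+1) m).isSome
                    · rfl
                    · exact absurd (pvSeqR_isSome_mono J K (pvRawEdges J K A S rho) (show cp+1 ≤ c by omega) hq) (by simp [hNOK])
                obtain ⟨memo2, v, hrun2, hvF, hinv2⟩ :=
                  ih cp e.1 memo1 (PySem.Set.add visiting node) hcp2 hcp3 (show cp < fuel by omega)
                    (show cp + 1 ≤ K.length + 1 by omega)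
                    (Or.inr (List.contains_iff_mem.1 hK)) hinv1 hvisP
                have hvs : v = s1 := by
                  have hst := pvSeqR_stable J K (pvRawEdges J K A S rho) c (K.length+1) e.1 s1 (by omega) hrec
                  rw [hst] at hvF
                  exact (Option.some_inj.1 hvF).symm
                subst hvs
                obtain ⟨memo3, hrun3, hinv3⟩ := ihr _ memo2 hinv2 out' hc
                refine ⟨memo3, ?_, hinv3⟩
                simp only [pvCandLoop, hJsF, hKs, if_true, if_false, Bool.false_eq_true]
                rw [hrun2]
                exact hrun3
            · have hJsF : PySem.Set.contains (PySem.Set.ofList J) e.1 = false := by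
                rw [pv_contains_ofList]; exact Bool.eq_false_iff.2 hJ
              have hKsF : PySem.Set.contains (PySem.Set.ofList K) e.1 = false := by
                rw [pv_contains_ofList]; exact Bool.eq_false_iff.2 hK
              simp only [pvCandsF, hJ, hK, if_false, Bool.false_eq_true] at hc
              obtain ⟨memo2, hrun, hinv2⟩ := ihr _ memo1 hinv1 out' hc
              exact ⟨memo2, by simp only [pvCandLoop, hJsF, hKsF, if_false, Bool.false_eq_true]; exact hrun, hinv2⟩
      obtain ⟨memo2, hloop, hinv2⟩ := hcand (pvRawEdges J K A S rho node) PySem.Set.empty memo hinv out hcr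
      have hrm := pv_set_remove_add visiting node hvn
      rcases hout : out with _ | ⟨c0, _ | ⟨c1, rest⟩⟩
      · subst hout
        have hval : pvSeqR J K (pvRawEdges J K A S rho) (c+1) node = some none := by
          simp only [pvSeqR, hcr]
        have hseqN := pvSeqR_stable J K (pvRawEdges J K A S rho) (c+1) (K.length+1) node none hcN hval
        refine ⟨memo2.insert node none, none, ?_, hseqN, ?_⟩
        · simp only [pvResolveA, hm, hvn, hp]
          rw [hloop]
          simp [hrm]
        · intro m s hms
          rw [PySem.Dict.get?_insert] at hms
          split_ifs at hms with hmn
          · subst hmn; cases hms; exact hseqN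
          · exact hinv2 m s hms
      · subst hout
        have hval : pvSeqR J K (pvRawEdges J K A S rho) (c+1) node = some c0 := by
          simp only [pvSeqR, hcr]
        have hseqN := pvSeqR_stable J K (pvRawEdges J K A S rho) (c+1) (K.length+1) node c0 hcN hval
        refine ⟨memo2.insert node c0, c0, ?_, hseqN, ?_⟩
        · simp only [pvResolveA, hm, hvn, hp]
          rw [hloop]
          simp [hrm]
        · intro m s hms
          rw [PySem.Dict.get?_insert] at hms
          split_ifs at hms with hmn
          · subst hmn; cases hms; exact hseqN
          · exact hinv2 m s hms
      · exfalso
        subst hout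
        rw [show pvSeqR J K (pvRawEdges J K A S rho) (c+1) node = none by
          simp only [pvSeqR, hcr]] at hOK
        simp at hOK
    · -- memo hit
      refine ⟨memo, s, ?_, hinv node s hm, hinv⟩
      simp [pvResolveA, hm]

-- A's top loop over J: memoised resolution writes the reference value for every j
theorem pv_topA (J : List String) (K : List String) (A : List (String × List String)) (S : List (String × List String)) (rho : List (String × String × String))
    (preds : PySem.Dict String (List (String × String)))
    (hpreds : ∀ m, m ∈ J ∨ m ∈ K → preds.get? m = some (pvRawEdges J K A S rho m)) :
    ∀ (Jl : List String), (∀ j ∈ Jl, j ∈ J) →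
      (∀ j ∈ Jl, (pvSeqR J K (pvRawEdges J K A S rho) (K.length + 1) j).isSome = true) →
      ∀ (memo : PySem.Dict String (Option (String × String)))
        (out : PySem.Dict String (Option (String × String))),
      pvInvA J K A S rho memo →
      ∃ memoF,
        Jl.foldl (fun acc j =>
          acc.bind fun st =>
            match pvResolveA (PySem.Set.ofList J) (PySem.Set.ofList K) preds (J.length + K.length + 1) j st.1 st.2.1 with
            | none => none
            | some (memo, vis, s) => some (memo, vis, st.2.2.insert j s))
          (some (memo, (PySem.Set.empty : PySem.Set String), out))
        = some (memoF, (PySem.Set.empty : PySem.Set String),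
            Jl.foldl (fun d j => d.insert j ((pvSeqR J K (pvRawEdges J K A S rho) (K.length+1) j).getD none)) out) := by
  intro Jl
  induction Jl with
  | nil => intro _ _ memo out hinv; exact ⟨memo, rfl⟩
  | cons j Jl ihl =>
    intro hsub hok memo out hinv
    obtain ⟨c, hc1, hc2, hc3⟩ := pvSeqR_min J K (pvRawEdges J K A S rho) (K.length+1) j (hok j List.mem_cons_self)
    obtain ⟨memo1, v, hrun, hv, hinv1⟩ :=
      pv_resolveA_correct J K A S rho preds hpreds (J.length + K.length + 1) c j memo
        PySem.Set.empty hc2 hc3 (by omega) (by omega) (Or.inl (hsub j List.mem_cons_self)) hinv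
        (fun m hmv => by simp [PySem.Set.contains] at hmv)
    obtain ⟨memoF, hrest⟩ :=
      ihl (fun y hy => hsub y (List.mem_cons_of_mem _ hy))
        (fun y hy => hok y (List.mem_cons_of_mem _ hy)) memo1 (out.insert j v) hinv1
    refine ⟨memoF, ?_⟩
    simp only [List.foldl_cons, Option.bind_some, hrun, hrest, hv, Option.getD_some]

-- ---- B's sweeps compute the same reference values ----

-- one sweep's candidate loop, sound: what it returns, some reference fuel also returns
theorem pvCandB_sound (J : List String) (K : List String) (A : List (String × List String)) (S : List (String × List String)) (rho : List (String × String × String))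
    (sq : PySem.Dict String (Option (String × String))) (hinv : pvInvB J K A S rho sq) :
    ∀ raw cands out, pvCandB (PySem.Set.ofList J) (PySem.Set.ofList K) sq raw cands = some out →
      ∃ f, pvCandsF J K (pvSeqR J K (pvRawEdges J K A S rho) f) raw cands = some out := by
  intro raw
  induction raw with
  | nil => intro cands out hc; exact ⟨0, by simpa [pvCandB, pvCandsF] using hc⟩
  | cons e rest ih =>
    intro cands out hc
    by_cases hJ : J.contains e.1 = true
    · have hJs : PySem.Set.contains (PySem.Set.ofList J) e.1 = true := by
        rw [pv_contains_ofList]; exact hJ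
      simp only [pvCandB, hJs, if_true] at hc
      obtain ⟨f, hf⟩ := ih _ _ hc
      exact ⟨f, by simp only [pvCandsF, hJ, if_true]; exact hf⟩
    · have hJsF : PySem.Set.contains (PySem.Set.ofList J) e.1 = false := by
        rw [pv_contains_ofList]; exact Bool.eq_false_iff.2 hJ
      by_cases hK : K.contains e.1 = true
      · have hKs : PySem.Set.contains (PySem.Set.ofList K) e.1 = true := by
          rw [pv_contains_ofList]; exact hK
        simp only [pvCandB, hJsF, hKs, if_true, if_false, Bool.false_eq_true] at hc
        rcases hg : sq.get? e.1 with _ | s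
        · rw [hg] at hc; cases hc
        · rw [hg] at hc
          obtain ⟨f1, hf1⟩ := hinv e.1 s hg
          obtain ⟨f2, hf2⟩ := ih _ _ hc
          refine ⟨max f1 f2, ?_⟩
          have hs' := pvSeqR_stable J K (pvRawEdges J K A S rho) f1 (max f1 f2) e.1 s (le_max_left _ _) hf1
          have hr' := pvCandsF_mono_rec J K
            (pvSeqR J K (pvRawEdges J K A S rho) f2) (pvSeqR J K (pvRawEdges J K A S rho) (max f1 f2))
            (fun m t => pvSeqR_stable J K (pvRawEdges J K A S rho) f2 (max f1 f2) m t (le_max_right _ _)) _ _ _ hf2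
          simp only [pvCandsF, hJ, hK, if_true, if_false, Bool.false_eq_true, hs']
          exact hr'
      · have hKsF : PySem.Set.contains (PySem.Set.ofList K) e.1 = false := by
          rw [pv_contains_ofList]; exact Bool.eq_false_iff.2 hK
        simp only [pvCandB, hJsF, hKsF, if_false, Bool.false_eq_true] at hc
        obtain ⟨f, hf⟩ := ih _ _ hc
        exact ⟨f, by simp only [pvCandsF, hJ, hK, if_false, Bool.false_eq_true]; exact hf⟩

-- one sweep's candidate loop, complete: if the reference succeeds at fuel r and the table already
-- holds every chance node resolvable at fuel r, the sweep computes the same candidate set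
theorem pvCandB_complete (J : List String) (K : List String) (A : List (String × List String)) (S : List (String × List String)) (rho : List (String × String × String))
    (sq : PySem.Dict String (Option (String × String))) (hinv : pvInvB J K A S rho sq) (r : Nat)
    (hcomp : ∀ m ∈ K, (pvSeqR J K (pvRawEdges J K A S rho) r m).isSome = true → (sq.get? m).isSome = true) :
    ∀ raw cands out, pvCandsF J K (pvSeqR J K (pvRawEdges J K A S rho) r) raw cands = some out →
      pvCandB (PySem.Set.ofList J) (PySem.Set.ofList K) sq raw cands = some out := by
  intro raw
  induction raw with
  | nil => intro cands out hc; simpa [pvCandB, pvCandsF] using hc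
  | cons e rest ih =>
    intro cands out hc
    by_cases hJ : J.contains e.1 = true
    · have hJs : PySem.Set.contains (PySem.Set.ofList J) e.1 = true := by
        rw [pv_contains_ofList]; exact hJ
      simp only [pvCandsF, hJ, if_true] at hc
      simp only [pvCandB, hJs, if_true]
      exact ih _ _ hc
    · have hJsF : PySem.Set.contains (PySem.Set.ofList J) e.1 = false := by
        rw [pv_contains_ofList]; exact Bool.eq_false_iff.2 hJ
      by_cases hK : K.contains e.1 = true
      · have hKs : PySem.Set.contains (PySem.Set.ofList K) e.1 = true := by
          rw [pv_contains_ofList]; exact hK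
        simp only [pvCandsF, hJ, hK, if_true, if_false, Bool.false_eq_true] at hc
        rcases hr : pvSeqR J K (pvRawEdges J K A S rho) r e.1 with _ | s
        · rw [hr] at hc; cases hc
        · rw [hr] at hc
          have hsome := hcomp e.1 (List.contains_iff_mem.1 hK) (by rw [hr]; rfl)
          obtain ⟨s', hs'⟩ := Option.isSome_iff_exists.1 hsome
          obtain ⟨f, hf⟩ := hinv e.1 s' hs'
          have hveq : s' = s := by
            have h1 := pvSeqR_stable J K (pvRawEdges J K A S rho) f (max f r) e.1 s' (le_max_left _ _) hf
            have h2 := pvSeqR_stable J K (pvRawEdges J K A S rho) r (max f r) e.1 s (le_max_right _ _) hr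
            rw [h1] at h2
            exact Option.some_inj.1 h2
          subst hveq
          simp only [pvCandB, hJsF, hKs, if_true, if_false, Bool.false_eq_true, hs']
          exact ih _ _ hc
      · have hKsF : PySem.Set.contains (PySem.Set.ofList K) e.1 = false := by
          rw [pv_contains_ofList]; exact Bool.eq_false_iff.2 hK
        simp only [pvCandsF, hJ, hK, if_false, Bool.false_eq_true] at hc
        simp only [pvCandB, hJsF, hKsF, if_false, Bool.false_eq_true]
        exact ih _ _ hc

theorem pvStepB_inv (J : List String) (K : List String) (A : List (String × List String)) (S : List (String × List String)) (rho : List (String × String × String))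
    (preds : PySem.Dict String (List (String × String)))
    (hpreds : ∀ m, m ∈ J ∨ m ∈ K → preds.get? m = some (pvRawEdges J K A S rho m))
    (sq : PySem.Dict String (Option (String × String))) (n : String) (hn : n ∈ J ∨ n ∈ K)
    (hinv : pvInvB J K A S rho sq) :
    pvInvB J K A S rho (pvStepB (PySem.Set.ofList J) (PySem.Set.ofList K) preds sq n) := by
  unfold pvStepB
  by_cases hres : (sq.get? n).isSome = true
  · simp only [hres, if_true]; exact hinv
  · simp only [hres, if_false, Bool.false_eq_true]
    have hraw : preds.getD n [] = pvRawEdges J K A S rho n := by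
      rw [PySem.Dict.getD_eq_get?_getD, hpreds n hn]; rfl
    rcases hcb : pvCandB (PySem.Set.ofList J) (PySem.Set.ofList K) sq (preds.getD n []) PySem.Set.empty with _ | out
    · exact hinv
    · obtain ⟨f, hf⟩ := pvCandB_sound J K A S rho sq hinv _ _ _ hcb
      rw [hraw] at hf
      rcases hout : out with _ | ⟨c0, _ | ⟨c1, rest⟩⟩
      · subst hout
        have hval : pvSeqR J K (pvRawEdges J K A S rho) (f+1) n = some none := by
          simp only [pvSeqR, hf]
        intro m s hms
        rw [PySem.Dict.get?_insert] at hms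
        split_ifs at hms with hmn
        · subst hmn; cases hms; exact ⟨f+1, hval⟩
        · exact hinv m s hms
      · subst hout
        have hval : pvSeqR J K (pvRawEdges J K A S rho) (f+1) n = some c0 := by
          simp only [pvSeqR, hf]
        intro m s hms
        rw [PySem.Dict.get?_insert] at hms
        split_ifs at hms with hmn
        · subst hmn; cases hms; exact ⟨f+1, hval⟩
        · exact hinv m s hms
      · subst hout; exact hinv

theorem pvStepB_mono (Jset Kset : PySem.Set String) (preds : PySem.Dict String (List (String × String)))
    (sq : PySem.Dict String (Option (String × String))) (n m : String)
    (h : (sq.get? m).isSome = true) :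
    ((pvStepB Jset Kset preds sq n).get? m).isSome = true := by
  unfold pvStepB
  by_cases hres : (sq.get? n).isSome = true
  · simpa [hres]
  · simp only [hres, if_false, Bool.false_eq_true]
    rcases pvCandB Jset Kset sq (preds.getD n []) PySem.Set.empty with _ | (_ | ⟨c0, _ | _⟩)
    · exact h
    · rw [PySem.Dict.get?_insert]
      split_ifs with hmn
      · rfl
      · exact h
    · rw [PySem.Dict.get?_insert]
      split_ifs with hmn
      · rfl
      · exact h
    · exact h

theorem pvFoldStep_mono (Jset Kset : PySem.Set String) (preds : PySem.Dict String (List (String × String))) :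
    ∀ (ns : List String) (sq : PySem.Dict String (Option (String × String))) (m : String),
      (sq.get? m).isSome = true → ((ns.foldl (pvStepB Jset Kset preds) sq).get? m).isSome = true := by
  intro ns
  induction ns with
  | nil => intro sq m h; exact h
  | cons n ns ih =>
    intro sq m h
    exact ih _ m (pvStepB_mono Jset Kset preds sq n m h)

-- one full sweep: table invariant preserved and every node resolvable at fuel r+1 is resolved
theorem pvRound_go (J : List String) (K : List String) (A : List (String × List String)) (S : List (String × List String)) (rho : List (String × String × String))
    (preds : PySem.Dict String (List (String × String)))
    (hpreds : ∀ m, m ∈ J ∨ m ∈ K → preds.get? m = some (pvRawEdges J K A S rho m)) :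
    ∀ (ns : List String), (∀ n ∈ ns, n ∈ J ∨ n ∈ K) →
      ∀ (sq : PySem.Dict String (Option (String × String))) (r : Nat),
      pvInvB J K A S rho sq →
      (∀ m ∈ K, (pvSeqR J K (pvRawEdges J K A S rho) r m).isSome = true → (sq.get? m).isSome = true) →
      pvInvB J K A S rho (ns.foldl (pvStepB (PySem.Set.ofList J) (PySem.Set.ofList K) preds) sq) ∧
      (∀ m ∈ ns, (pvSeqR J K (pvRawEdges J K A S rho) (r+1) m).isSome = true →
        ((ns.foldl (pvStepB (PySem.Set.ofList J) (PySem.Set.ofList K) preds) sq).get? m).isSome = true) := by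
  intro ns
  induction ns with
  | nil => intro _ sq r hinv _; exact ⟨hinv, fun m hm => absurd hm (by simp)⟩
  | cons n ns ih =>
    intro hsub sq r hinv hcomp
    have hn : n ∈ J ∨ n ∈ K := hsub n List.mem_cons_self
    have hinv1 := pvStepB_inv J K A S rho preds hpreds sq n hn hinv
    have hcomp1 : ∀ m ∈ K, (pvSeqR J K (pvRawEdges J K A S rho) r m).isSome = true →
        (((pvStepB (PySem.Set.ofList J) (PySem.Set.ofList K) preds sq n)).get? m).isSome = true :=
      fun m hm hok => pvStepB_mono _ _ _ sq n m (hcomp m hm hok)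
    obtain ⟨hinvF, hcompF⟩ := ih (fun y hy => hsub y (List.mem_cons_of_mem _ hy)) _ r hinv1 hcomp1
    refine ⟨by simpa [List.foldl_cons] using hinvF, ?_⟩
    intro m hm hok
    rcases List.mem_cons.1 hm with rfl | hm'
    · -- head node: it gets resolved by its own step (or already was)
      simp only [List.foldl_cons]
      apply pvFoldStep_mono
      by_cases hres : (sq.get? m).isSome = true
      · exact pvStepB_mono _ _ _ sq m m hres
      · have hraw : preds.getD m [] = pvRawEdges J K A S rho m := by
          rw [PySem.Dict.getD_eq_get?_getD, hpreds m hn]; rfl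
        rcases hcr : pvCandsF J K (pvSeqR J K (pvRawEdges J K A S rho) r) (pvRawEdges J K A S rho m) PySem.Set.empty with _ | out
        · exfalso
          rw [show pvSeqR J K (pvRawEdges J K A S rho) (r+1) m = none by
            simp only [pvSeqR, hcr]] at hok
          simp at hok
        · have hcb := pvCandB_complete J K A S rho sq hinv r hcomp _ _ _ hcr
          rw [← hraw] at hcb
          unfold pvStepB
          simp only [hres, if_false, Bool.false_eq_true, hcb]
          rcases hout : out with _ | ⟨c0, _ | ⟨c1, rest⟩⟩
          · rw [PySem.Dict.get?_insert]; simp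
          · rw [PySem.Dict.get?_insert]; simp
          · exfalso
            subst hout
            rw [show pvSeqR J K (pvRawEdges J K A S rho) (r+1) m = none by
              simp only [pvSeqR, hcr]] at hok
            simp at hok
    · simpa [List.foldl_cons] using hcompF m hm' hok

-- all sweeps: by induction on the number of rounds
theorem pvRounds (J : List String) (K : List String) (A : List (String × List String)) (S : List (String × List String)) (rho : List (String × String × String))
    (preds : PySem.Dict String (List (String × String)))
    (hpreds : ∀ m, m ∈ J ∨ m ∈ K → preds.get? m = some (pvRawEdges J K A S rho m)) :
    ∀ (i : Nat),
      pvInvB J K A S rho ((List.range i).foldl (fun sq _ => pvRoundB (PySem.Set.ofList J) (PySem.Set.ofList K) preds (J ++ K) sq) (PySem.Dict.mk [])) ∧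
      (∀ m, m ∈ J ∨ m ∈ K → (pvSeqR J K (pvRawEdges J K A S rho) i m).isSome = true →
        (((List.range i).foldl (fun sq _ => pvRoundB (PySem.Set.ofList J) (PySem.Set.ofList K) preds (J ++ K) sq) (PySem.Dict.mk [])).get? m).isSome = true) := by
  intro i
  induction i with
  | zero =>
    constructor
    · intro m s hms; simp [PySem.Dict.get?] at hms
    · intro m _ hok; simp [pvSeqR] at hok
  | succ i ih =>
    obtain ⟨hinv, hcomp⟩ := ih
    rw [List.range_succ, List.foldl_append, List.foldl_cons, List.foldl_nil]
    obtain ⟨hinvF, hcompF⟩ :=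
      pvRound_go J K A S rho preds hpreds (J ++ K) (fun n hn => List.mem_append.1 hn)
        ((List.range i).foldl (fun sq _ => pvRoundB (PySem.Set.ofList J) (PySem.Set.ofList K) preds (J ++ K) sq) (PySem.Dict.mk []))
        i hinv (fun m hm hok => hcomp m (Or.inr hm) hok)
    exact ⟨hinvF, fun m hm hok => hcompF m (List.mem_append.2 hm) hok⟩

-- B's final loop over J writes the same reference value for every j
theorem pv_topB (J : List String) (K : List String) (A : List (String × List String)) (S : List (String × List String)) (rho : List (String × String × String))
    (seqF : PySem.Dict String (Option (String × String)))
    (hinv : pvInvB J K A S rho seqF)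
    (hres : ∀ j ∈ J, (pvSeqR J K (pvRawEdges J K A S rho) (K.length+1) j).isSome = true → ((seqF.get? j).isSome = true)) :
    ∀ (Jl : List String), (∀ j ∈ Jl, j ∈ J) →
      (∀ j ∈ Jl, (pvSeqR J K (pvRawEdges J K A S rho) (K.length+1) j).isSome = true) →
      ∀ (out : PySem.Dict String (Option (String × String))),
        Jl.foldl (fun acc j =>
          acc.bind fun res =>
            match seqF.get? j with
            | none => none
            | some s => some (res.insert j s))
          (some out)
        = some (Jl.foldl (fun d j => d.insert j ((pvSeqR J K (pvRawEdges J K A S rho) (K.length+1) j).getD none)) out) := by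
  intro Jl
  induction Jl with
  | nil => intro _ _ out; simp
  | cons j Jl ihl =>
    intro hsub hok out
    have hj : j ∈ J := hsub j List.mem_cons_self
    have hokj := hok j List.mem_cons_self
    obtain ⟨s, hs⟩ := Option.isSome_iff_exists.1 (hres j hj hokj)
    obtain ⟨v, hv⟩ := Option.isSome_iff_exists.1 hokj
    obtain ⟨f, hf⟩ := hinv j s hs
    have hveq : s = v := by
      have h1 := pvSeqR_stable J K (pvRawEdges J K A S rho) f (max f (K.length+1)) j s (le_max_left _ _) hf
      have h2 := pvSeqR_stable J K (pvRawEdges J K A S rho) (K.length+1) (max f (K.length+1)) j v (le_max_right _ _) hv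
      rw [h1] at h2
      exact Option.some_inj.1 h2
    subst hveq
    simp only [List.foldl_cons, Option.bind_some, hs, hv, Option.getD_some]
    exact ihl (fun y hy => hsub y (List.mem_cons_of_mem _ hy))
      (fun y hy => hok y (List.mem_cons_of_mem _ hy)) (out.insert j s)

-- ===== VERDICT (by name: the statement is the Claim_ definition above) =====
theorem build_parent_sequences_spec : Claim_equal_build_parent_sequences := by
  intro J K A S rho hdom hpre
  obtain ⟨hA, hR, hS, hRS, hok⟩ := hpre
  unfold Spec_build_parent_sequences
  simp only [build_parent_sequences, build_parent_sequences_alt]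
  obtain ⟨preds, hbp, hpreds⟩ := pv_buildPreds J K A S rho hA hR hS hRS
  rw [hbp]
  obtain ⟨memoF, htopA⟩ :=
    pv_topA J K A S rho preds hpreds J (fun _ h => h) hok (PySem.Dict.mk []) (PySem.Dict.mk [])
      (fun m s hms => by simp [PySem.Dict.get?] at hms)
  obtain ⟨hinvF, hcompF⟩ := pvRounds J K A S rho preds hpreds (K.length + 1)
  have htopB :=
    pv_topB J K A S rho _ hinvF (fun j hj hokj => hcompF j (Or.inl hj) hokj)
      J (fun _ h => h) hok (PySem.Dict.mk [])
  simp only [htopA, htopB]
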